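-- pv_equiv track=rewrite | github.com/NROasis/AOC-2023 | Day3_Solution.py | check_rows_star
-- ===== SOURCE A (Python) =====
-- def extract_num(line,idx):
--     num=line[idx]
--     i=idx
--     while line[i-1].isdigit():
--         num = line[i-1]+num
--         i = i-1
--     i=idx
--     while line[i+1].isdigit():
--         num = num + line[i+1]
--         i = i+1
--     return(num)
--
-- def check_rows_star(line_above,index):
--     num_list = []
--     duplicate_protect = False
--     if index == 0:
--         for i in range(index,index+2):
--             if line_above[i].isdigit() == True and duplicate_protect == False:
--                 num_list.append(extract_num(line_above,i))
--                 duplicate_protect=True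
--             if line_above[i].isdigit() == False:
--                 duplicate_protect=False
--     elif index == len(line_above)-1:
--         for i in range(index-1,index+1):
--             if line_above[i].isdigit() == True and duplicate_protect == False:
--                 num_list.append(extract_num(line_above,i))
--                 duplicate_protect=True
--             if line_above[i].isdigit() == False:
--                 duplicate_protect=False
--     else:
--         for i in range(index-1,index+2):
--             if line_above[i].isdigit() == True and duplicate_protect == False:
--                 num_list.append(extract_num(line_above,i))
--                 duplicate_protect=True
--             if line_above[i].isdigit() == False:
--                 duplicate_protect=False
--     return(num_list)
-- ===== SOURCE B (Python) =====
-- def check_rows_star(line_above, index):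
--     # Find every maximal digit run in one left-to-right pass, then keep the runs
--     # whose span overlaps the 3-cell window around the star column.
--     lo = max(0, index - 1)
--     hi = min(len(line_above) - 1, index + 1)
--     runs = []
--     start = None
--     for i, ch in enumerate(line_above):
--         if ch.isdigit():
--             if start is None:
--                 start = i
--         else:
--             if start is not None:
--                 runs.append((start, i - 1))
--             start = None
--     if start is not None:
--         runs.append((start, len(line_above) - 1))
--     return [line_above[s:e + 1] for (s, e) in runs if s <= hi and e >= lo]
-- ===== Notes on version B (the rewrite author's own statement) =====
-- stated objective: alternative
-- what changed: Replaces A's per-cell window scan with stateful duplicate_protect flag and char-by-char extract_num expansion by a single left-to-right pass that collects all maximal digit runs as (start,end) spans and then filters them by overlap with the window [max(0,index-1), min(len-1,index+1)], slicing each kept run out of the string.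
-- intended difference: On inputs where A's Python negative indexing lands on a digit - a nonnegative star column whose adjacent digit run starts at column 0 while the line ends in a digit (extract_num wraps left past 0), or a negative star column whose wrapped 3-cell window contains a digit - A returns numbers glued with or taken from the far end of the line (A('1a9',0)=['91']), while B returns only the digits actually adjacent to the star (['1']), the intended value. — e.g. on check_rows_star("1a9", 0): A returns ["91"], B returns ["1"]
-- outside the precondition, e.g. on check_rows_star('5a5', -1): A returns ['55'], B returns ['5']
import Mathlib
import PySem

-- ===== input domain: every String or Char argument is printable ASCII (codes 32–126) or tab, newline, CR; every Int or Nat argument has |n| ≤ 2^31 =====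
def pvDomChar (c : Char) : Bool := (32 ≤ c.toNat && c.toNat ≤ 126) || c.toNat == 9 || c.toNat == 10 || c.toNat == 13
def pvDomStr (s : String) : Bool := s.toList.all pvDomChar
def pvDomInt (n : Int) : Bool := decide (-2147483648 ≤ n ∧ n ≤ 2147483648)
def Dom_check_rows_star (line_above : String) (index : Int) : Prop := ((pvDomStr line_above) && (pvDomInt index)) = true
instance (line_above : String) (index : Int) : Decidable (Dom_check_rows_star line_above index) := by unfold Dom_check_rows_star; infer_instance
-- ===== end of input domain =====

-- B finds all maximal digit runs in one pass and filters them by window overlap, instead of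
-- A's per-cell window scan with a duplicate_protect flag and char-by-char extract_num; on the
-- inputs where A's Python negative indexing lands on a digit, A glues in / reads digits from
-- the far end of the line and B returns only the digits adjacent to the star (D_).


-- ===== PORT A =====

-- line[i].isdigit() (none = IndexError, which Pre_ excludes; rendered false here)
def pvDigA (l : List Char) (i : Int) : Bool :=
  match PySem.List.pyGet? l i with
  | some c => PySem.Chars.isdigit c
  | none => false

-- first while loop of extract_num (prepends digits leftwards; fuel suffices on every
-- input where the Python loop terminates without raising)
def pvExtLeft (l : List Char) : Nat → List Char → Int → List Char
  | 0, num, _ => num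
  | fuel + 1, num, i =>
    match PySem.List.pyGet? l (i - 1) with
    | some c => if PySem.Chars.isdigit c then pvExtLeft l fuel (c :: num) (i - 1) else num
    | none => num

-- second while loop of extract_num (appends digits rightwards)
def pvExtRight (l : List Char) : Nat → List Char → Int → List Char
  | 0, num, _ => num
  | fuel + 1, num, i =>
    match PySem.List.pyGet? l (i + 1) with
    | some c => if PySem.Chars.isdigit c then pvExtRight l fuel (num ++ [c]) (i + 1) else num
    | none => num

def pvExtract (l : List Char) (idx : Int) : List Char :=
  match PySem.List.pyGet? l idx with
  | none => []   -- Python raises here; outside Pre_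
  | some c => pvExtRight l (2 * l.length + 2) (pvExtLeft l (2 * l.length + 2) [c] idx) idx

-- the shared loop body: the two ifs of A, over state (num_list, duplicate_protect)
def pvBodyA (l : List Char) (st : List (List Char) × Bool) (i : Int) : List (List Char) × Bool :=
  let d := pvDigA l i
  let st' := if d && !st.2 then (st.1 ++ [pvExtract l i], true) else st
  if d = false then (st'.1, false) else st'

def check_rows_star (line_above : String) (index : Int) : List String :=
  let l := line_above.toList
  let loop := fun (r : List Int) => ((r.foldl (pvBodyA l) ([], false)).1)
  let nums :=
    if index = 0 then
      loop (PySem.List.pyRange index (index + 2) 1)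
    else if index = (l.length : Int) - 1 then
      loop (PySem.List.pyRange (index - 1) (index + 1) 1)
    else
      loop (PySem.List.pyRange (index - 1) (index + 2) 1)
  nums.map String.ofList

-- ===== PORT B =====

-- the for-loop of B: builds the list of (start, end) spans of maximal digit runs
def pvRunsLoop : List (Int × Char) → List (Int × Int) → Option Int → List (Int × Int) × Option Int
  | [], runs, st => (runs, st)
  | (i, ch) :: rest, runs, st =>
    if PySem.Chars.isdigit ch then
      pvRunsLoop rest runs (some (st.getD i))
    else
      match st with
      | none => pvRunsLoop rest runs none
      | some s => pvRunsLoop rest (runs ++ [(s, i - 1)]) none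

def check_rows_star_alt (line_above : String) (index : Int) : List String :=
  let l := line_above.toList
  let lo := max 0 (index - 1)
  let hi := min ((l.length : Int) - 1) (index + 1)
  let p := pvRunsLoop (PySem.List.enumerate l 0) [] none
  let runs := match p.2 with
    | none => p.1
    | some s => p.1 ++ [(s, (l.length : Int) - 1)]
  (runs.filter (fun q => decide (q.1 ≤ hi) && decide (lo ≤ q.2))).map
    (fun q => String.ofList (PySem.List.slice l (some q.1) (some (q.2 + 1))))

-- ===== PRECONDITION & SPEC =====

-- digit test at an Int position, false off the right end and at negative positions
def pvDg (l : List Char) (j : Int) : Bool :=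
  decide (0 ≤ j) && ((l[j.toNat]?.map PySem.Chars.isdigit).getD false)

-- Pre_ admits (a) valid star columns whose adjacent digit run does not reach the end of the
-- line (A raises IndexError there) with len ≥ 2 (A raises on shorter lines), and (b) the
-- negative star columns on which A returns without raising and whose wraparound coupling with
-- column 0 / the line's end is digit-free; the remaining negative columns are excluded: there
-- A either raises (its raising has no simple closed form) or returns a wraparound value that
-- already lies inside D_ (e.g. A("5a5",-1) = ['55'] where B gives ['5']).
def Pre_check_rows_star (line_above : String) (index : Int) : Prop :=
  (0 ≤ index ∧ index < line_above.toList.length ∧ 2 ≤ line_above.toList.length ∧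
    ¬ ((line_above.toList.drop (min (line_above.toList.length - 1) (index + 1).toNat)).all
        PySem.Chars.isdigit = true)) ∨
  (index = -1 ∧ 2 ≤ line_above.toList.length ∧
    pvDg line_above.toList ((line_above.toList.length : Int) - 2) = false ∧
    pvDg line_above.toList ((line_above.toList.length : Int) - 1) = false) ∨
  (1 - (line_above.toList.length : Int) ≤ index ∧ index ≤ -2 ∧
    pvDg line_above.toList ((line_above.toList.length : Int) + index - 1) = false ∧
    pvDg line_above.toList ((line_above.toList.length : Int) + index) = false ∧
    pvDg line_above.toList ((line_above.toList.length : Int) + index + 1) = false) ∨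
  (index = -1 ∧ 2 ≤ line_above.toList.length ∧
    pvDg line_above.toList 0 = false ∧
    (pvDg line_above.toList ((line_above.toList.length : Int) - 2) = true ∨
      pvDg line_above.toList ((line_above.toList.length : Int) - 1) = true)) ∨
  (2 - (line_above.toList.length : Int) ≤ index ∧ index ≤ -2 ∧
    pvDg line_above.toList 0 = false ∧
    pvDg line_above.toList ((line_above.toList.length : Int) - 1) = false ∧
    (pvDg line_above.toList ((line_above.toList.length : Int) + index - 1) = true ∨
      pvDg line_above.toList ((line_above.toList.length : Int) + index) = true ∨
      pvDg line_above.toList ((line_above.toList.length : Int) + index + 1) = true))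
instance (line_above : String) (index : Int) : Decidable (Pre_check_rows_star line_above index) := by
  unfold Pre_check_rows_star; infer_instance

def pvWitness_check_rows_star : String × Int := ("*a", 0)

-- D_ is the inputs where A's Python negative indexing lands on a digit: a nonnegative star
-- column whose adjacent digit run starts at column 0 while the line ends in a digit
-- (extract_num wraps left past 0 and A returns the adjacent number with the line's trailing
-- digits glued in front, A("1a9",0) = ["91"]), or a negative star column whose wrapped 3-cell
-- window contains a digit (A returns numbers read from the far end of the line); B returns
-- only the digits actually adjacent to the star (["1"]), which is the intended value.
def D_check_rows_star (line_above : String) (index : Int) : Prop :=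
  (0 ≤ index ∧
    (line_above.toList.take ((index - 1).toNat + 1)).all PySem.Chars.isdigit = true ∧
    pvDg line_above.toList ((line_above.toList.length : Int) - 1) = true) ∨
  (index < 0 ∧
    (pvDg line_above.toList ((line_above.toList.length : Int) + index - 1) = true ∨
      pvDg line_above.toList ((line_above.toList.length : Int) + index) = true ∨
      pvDg line_above.toList ((line_above.toList.length : Int) + index + 1) = true))
instance (line_above : String) (index : Int) : Decidable (D_check_rows_star line_above index) := by
  unfold D_check_rows_star; infer_instance

def Spec_check_rows_star (line_above : String) (index : Int) (out : List String) : Prop :=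
  ¬ D_check_rows_star line_above index → out = check_rows_star_alt line_above index
instance (line_above : String) (index : Int) (out : List String) :
    Decidable (Spec_check_rows_star line_above index out) := by
  unfold Spec_check_rows_star; infer_instance

def pvDiffWitness_check_rows_star : String × Int := ("1a9", 0)
def pvDiffWitnessOut_check_rows_star : (List String) × (List String) := (["91"], ["1"])

-- ===== CLAIM (what is proved, stated in full; the proofs are below) =====
def Claim_unchanged_check_rows_star : Prop := ∀ (line_above : String) (index : Int), Dom_check_rows_star line_above index → Pre_check_rows_star line_above index → Spec_check_rows_star line_above index (check_rows_star line_above index)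
def Claim_changed_check_rows_star : Prop := Dom_check_rows_star (pvDiffWitness_check_rows_star.1) (pvDiffWitness_check_rows_star.2) ∧ Pre_check_rows_star (pvDiffWitness_check_rows_star.1) (pvDiffWitness_check_rows_star.2) ∧ D_check_rows_star (pvDiffWitness_check_rows_star.1) (pvDiffWitness_check_rows_star.2) ∧ check_rows_star (pvDiffWitness_check_rows_star.1) (pvDiffWitness_check_rows_star.2) = pvDiffWitnessOut_check_rows_star.1 ∧ check_rows_star_alt (pvDiffWitness_check_rows_star.1) (pvDiffWitness_check_rows_star.2) = pvDiffWitnessOut_check_rows_star.2 ∧ pvDiffWitnessOut_check_rows_star.1 ≠ pvDiffWitnessOut_check_rows_star.2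

-- ===== LEMMAS AND PROOFS =====

-- a maximal digit run of l (left boundary at -1 is automatic)
def pvIsRun (l : List Char) (s e : Int) : Prop :=
  0 ≤ s ∧ s ≤ e ∧ e < l.length ∧ (∀ j : Int, s ≤ j → j ≤ e → pvDg l j = true) ∧
  pvDg l (s - 1) = false ∧ pvDg l (e + 1) = false

-- recursive model of B's run collection (loop plus final flush)
def pvRunsM : List Char → Int → Option Int → List (Int × Int)
  | [], _, none => []
  | [], p, some s => [(s, p - 1)]
  | c :: rest, p, st =>
    if PySem.Chars.isdigit c then
      pvRunsM rest (p + 1) (some (st.getD p))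
    else
      match st with
      | none => pvRunsM rest (p + 1) none
      | some s => (s, p - 1) :: pvRunsM rest (p + 1) none

theorem runsLoop_eq (t : List Char) : ∀ (p : Int) (acc : List (Int × Int)) (st : Option Int),
    (let q := pvRunsLoop (PySem.List.enumerate t p) acc st
     match q.2 with
     | none => q.1
     | some s => q.1 ++ [(s, p + t.length - 1)]) = acc ++ pvRunsM t p st := by
  induction t with
  | nil =>
    intro p acc st
    cases st <;> simp [pvRunsLoop, pvRunsM, PySem.List.enumerate_nil]
  | cons c rest ih =>
    intro p acc st
    rw [PySem.List.enumerate_cons]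
    have harith : p + ((c :: rest).length : Int) - 1 = (p + 1) + (rest.length : Int) - 1 := by
      simp only [List.length_cons]; push_cast; ring
    by_cases hd : PySem.Chars.isdigit c
    · simp only [pvRunsLoop, pvRunsM, hd, if_pos]
      rw [harith]
      exact ih (p + 1) acc (some (st.getD p))
    · cases st with
      | none =>
        simp only [pvRunsLoop, pvRunsM, hd, if_neg, Bool.false_eq_true, not_false_iff]
        rw [harith]
        exact ih (p + 1) acc none
      | some s =>
        simp only [pvRunsLoop, pvRunsM, hd, if_neg, Bool.false_eq_true, not_false_iff]
        rw [harith]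
        have := ih (p + 1) (acc ++ [(s, p - 1)]) none
        simp only [List.append_assoc] at this ⊢
        exact this

theorem pvDg_neg {l : List Char} {j : Int} (h : j < 0) : pvDg l j = false := by
  simp only [pvDg, Bool.and_eq_false_iff, decide_eq_false_iff_not, not_le]
  left; exact h

theorem pvDg_ge {l : List Char} {j : Int} (h : (l.length : Int) ≤ j) : pvDg l j = false := by
  have : l[j.toNat]? = none := by
    apply List.getElem?_eq_none
    omega
  simp [pvDg, this]

theorem pvDg_nat_lt {l : List Char} {j : Nat} (h : j < l.length) :
    pvDg l (j : Int) = PySem.Chars.isdigit l[j] := by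
  simp [pvDg, List.getElem?_eq_getElem h]

theorem pvDg_true_lt {l : List Char} {j : Int} (h : pvDg l j = true) :
    0 ≤ j ∧ j < l.length := by
  by_contra hc
  rcases not_and_or.mp hc with h1 | h1
  · rw [pvDg_neg (by omega)] at h; exact Bool.false_ne_true h
  · rw [pvDg_ge (by omega)] at h; exact Bool.false_ne_true h

theorem runsM_sound (l : List Char) : ∀ (m k : Nat), l.length ≤ k + m → ∀ (st : Option Int),
    ((st = none ∧ (k = 0 ∨ pvDg l ((k : Int) - 1) = false)) ∨
      (∃ s : Nat, st = some (s : Int) ∧ s < k ∧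
        (∀ j : Nat, s ≤ j → j < k → pvDg l (j : Int) = true) ∧ pvDg l ((s : Int) - 1) = false)) →
    ∀ se ∈ pvRunsM (l.drop k) k st, pvIsRun l se.1 se.2 := by
  intro m
  induction m with
  | zero =>
    intro k hm st hinv se hse
    rw [List.drop_eq_nil_of_le (by omega)] at hse
    rcases hinv with ⟨hst, _⟩ | ⟨s, hst, hsk, hdig, hbnd⟩
    · subst hst; simp [pvRunsM] at hse
    · subst hst
      simp only [pvRunsM, List.mem_singleton] at hse
      subst hse
      have hdg : pvDg l ((k : Int) - 1) = true := by
        have : ((k - 1 : Nat) : Int) = (k : Int) - 1 := by omega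
        rw [← this]; exact hdig (k - 1) (by omega) (by omega)
      have hlt := pvDg_true_lt hdg
      refine ⟨by positivity, by omega, by omega, ?_, hbnd, ?_⟩
      · intro j hj1 hj2
        have : j = ((j.toNat : Nat) : Int) := by omega
        rw [this]; exact hdig j.toNat (by omega) (by omega)
      · have : (k : Int) - 1 + 1 = (k : Int) := by ring
        rw [this]; exact pvDg_ge (by omega)
  | succ m ih =>
    intro k hm st hinv se hse
    by_cases hk : l.length ≤ k
    · exact ih k (by omega) st hinv se hse
    replace hk : k < l.length := by omega
    rw [List.drop_eq_getElem_cons hk] at hse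
    have hkd : pvDg l (k : Int) = PySem.Chars.isdigit l[k] := pvDg_nat_lt hk
    by_cases hd : PySem.Chars.isdigit l[k]
    · simp only [pvRunsM, hd, if_pos] at hse
      rcases hinv with ⟨hst, hbnd⟩ | ⟨s, hst, hsk, hdig, hbnd⟩
      · subst hst
        refine ih (k + 1) (by omega) _ (Or.inr ⟨k, rfl, by omega, ?_, ?_⟩) se hse
        · intro j hj1 hj2
          have : j = k := by omega
          subst this; rw [hkd]; exact hd
        · rcases hbnd with h0 | h0
          · subst h0; exact pvDg_neg (by omega)
          · exact h0
      · subst hst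
        refine ih (k + 1) (by omega) _ (Or.inr ⟨s, rfl, by omega, ?_, hbnd⟩) se hse
        intro j hj1 hj2
        by_cases hjk : j = k
        · subst hjk; rw [hkd]; exact hd
        · exact hdig j hj1 (by omega)
    · rcases hinv with ⟨hst, hbnd⟩ | ⟨s, hst, hsk, hdig, hbnd⟩
      · subst hst
        simp only [pvRunsM, hd, if_neg, Bool.false_eq_true, not_false_iff] at hse
        refine ih (k + 1) (by omega) _ (Or.inl ⟨rfl, Or.inr ?_⟩) se hse
        have : ((k + 1 : Nat) : Int) - 1 = (k : Int) := by omega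
        rw [this, hkd]; simpa using hd
      · subst hst
        simp only [pvRunsM, hd, if_neg, Bool.false_eq_true, not_false_iff, List.mem_cons] at hse
        rcases hse with hse | hse
        · subst hse
          refine ⟨by positivity, by omega, by omega, ?_, hbnd, ?_⟩
          · intro j hj1 hj2
            have : j = ((j.toNat : Nat) : Int) := by omega
            rw [this]; exact hdig j.toNat (by omega) (by omega)
          · have : (k : Int) - 1 + 1 = (k : Int) := by ring
            rw [this, hkd]; simpa using hd
        · refine ih (k + 1) (by omega) _ (Or.inl ⟨rfl, Or.inr ?_⟩) se hse
          have : ((k + 1 : Nat) : Int) - 1 = (k : Int) := by omega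
          rw [this, hkd]; simpa using hd

theorem runsM_complete (l : List Char) : ∀ (m k : Nat), l.length ≤ k + m → ∀ (st : Option Int),
    (st = none ∨ ∃ s : Nat, st = some (s : Int) ∧ s ≤ k) →
    ∀ j : Nat, pvDg l (j : Int) = true →
    (k ≤ j ∨ ∃ s : Nat, st = some (s : Int) ∧ s ≤ j) →
    ∃ se ∈ pvRunsM (l.drop k) k st, se.1 ≤ (j : Int) ∧ (j : Int) ≤ se.2 := by
  intro m
  induction m with
  | zero =>
    intro k hm st hinv j hj hcov
    have hjl := pvDg_true_lt hj
    rw [List.drop_eq_nil_of_le (by omega)]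
    rcases hcov with hc | ⟨s, hst, hsj⟩
    · omega
    · subst hst
      exact ⟨((s : Int), (k : Int) - 1), by simp [pvRunsM], by push_cast; omega⟩
  | succ m ih =>
    intro k hm st hinv j hj hcov
    by_cases hk : l.length ≤ k
    · exact ih k (by omega) st hinv j hj hcov
    replace hk : k < l.length := by omega
    have hjl := pvDg_true_lt hj
    rw [List.drop_eq_getElem_cons hk]
    have hkd : pvDg l (k : Int) = PySem.Chars.isdigit l[k] := pvDg_nat_lt hk
    by_cases hd : PySem.Chars.isdigit l[k]
    · simp only [pvRunsM, hd, if_pos]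
      rcases hinv with hst | ⟨s, hst, hsk⟩
      · subst hst
        refine ih (k + 1) (by omega) _ (Or.inr ⟨k, rfl, by omega⟩) j hj (Or.inr ⟨k, by simp [Option.getD], ?_⟩)
        rcases hcov with hc | ⟨s, hst, _⟩
        · exact hc
        · exact absurd hst (by simp)
      · subst hst
        refine ih (k + 1) (by omega) _ (Or.inr ⟨s, by simp [Option.getD], by omega⟩) j hj
          (Or.inr ⟨s, by simp [Option.getD], ?_⟩)
        rcases hcov with hc | ⟨s', hst', hsj⟩
        · omega
        · have : s' = s := by
            have := hst'
            simp only [Option.some.injEq] at this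
            exact_mod_cast this.symm
          omega
    · rcases hinv with hst | ⟨s, hst, hsk⟩
      · subst hst
        simp only [pvRunsM, hd, if_neg, Bool.false_eq_true, not_false_iff]
        refine ih (k + 1) (by omega) none (Or.inl rfl) j hj (Or.inl ?_)
        rcases hcov with hc | ⟨s, hst, _⟩
        · have hjk : j ≠ k := by
            intro h; subst h; rw [hkd] at hj; exact hd (by simpa using hj)
          omega
        · exact absurd hst (by simp)
      · subst hst
        simp only [pvRunsM, hd, if_neg, Bool.false_eq_true, not_false_iff]
        have hjk : j ≠ k := by
          intro h; subst h; rw [hkd] at hj; exact hd (by simpa using hj)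
        rcases hcov with hc | ⟨s', hst', hsj⟩
        · have : k + 1 ≤ j := by omega
          obtain ⟨se, hmem, hb⟩ := ih (k + 1) (by omega) none (Or.inl rfl) j hj (Or.inl this)
          exact ⟨se, List.mem_cons_of_mem _ hmem, hb⟩
        · have hss : s' = s := by
            have := hst'
            simp only [Option.some.injEq] at this
            exact_mod_cast this.symm
          subst hss
          by_cases hjk2 : j < k
          · exact ⟨((s' : Int), (k : Int) - 1), List.mem_cons_self .., by push_cast; omega⟩
          · have : k + 1 ≤ j := by omega
            obtain ⟨se, hmem, hb⟩ := ih (k + 1) (by omega) none (Or.inl rfl) j hj (Or.inl this)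
            exact ⟨se, List.mem_cons_of_mem _ hmem, hb⟩

theorem runsM_lb (l : List Char) : ∀ (m k : Nat), l.length ≤ k + m → ∀ (st : Option Int) (lb : Int),
    (match st with | none => lb ≤ k | some s => lb ≤ s ∧ s ≤ k) →
    ∀ se ∈ pvRunsM (l.drop k) k st, lb ≤ se.1 := by
  intro m
  induction m with
  | zero =>
    intro k hm st lb hlb se hse
    rw [List.drop_eq_nil_of_le (by omega)] at hse
    cases st with
    | none => simp [pvRunsM] at hse
    | some s =>
      simp only [pvRunsM, List.mem_singleton] at hse
      subst hse; exact hlb.1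
  | succ m ih =>
    intro k hm st lb hlb se hse
    by_cases hk : l.length ≤ k
    · exact ih k (by omega) st lb hlb se hse
    replace hk : k < l.length := by omega
    rw [List.drop_eq_getElem_cons hk] at hse
    by_cases hd : PySem.Chars.isdigit l[k]
    · simp only [pvRunsM, hd, if_pos] at hse
      cases st with
      | none => exact ih (k + 1) (by omega) _ lb (by simp [Option.getD]; try omega) se hse
      | some s => exact ih (k + 1) (by omega) _ lb (by simpa [Option.getD] using ⟨hlb.1, by omega⟩) se hse
    · cases st with
      | none =>
        simp only [pvRunsM, hd, if_neg, Bool.false_eq_true, not_false_iff] at hse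
        exact ih (k + 1) (by omega) none lb (by simp; try omega) se hse
      | some s =>
        simp only [pvRunsM, hd, if_neg, Bool.false_eq_true, not_false_iff, List.mem_cons] at hse
        rcases hse with hse | hse
        · subst hse; exact hlb.1
        · exact ih (k + 1) (by omega) none lb (by simp; try omega) se hse

theorem runsM_pairwise (l : List Char) : ∀ (m k : Nat), l.length ≤ k + m → ∀ (st : Option Int),
    (match st with | none => True | some s => s ≤ k) →
    (pvRunsM (l.drop k) k st).Pairwise (fun a b => a.2 < b.1) := by
  intro m
  induction m with
  | zero =>
    intro k hm st hst
    rw [List.drop_eq_nil_of_le (by omega)]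
    cases st <;> simp [pvRunsM]
  | succ m ih =>
    intro k hm st hst
    by_cases hk : l.length ≤ k
    · exact ih k (by omega) st hst
    replace hk : k < l.length := by omega
    rw [List.drop_eq_getElem_cons hk]
    by_cases hd : PySem.Chars.isdigit l[k]
    · simp only [pvRunsM, hd, if_pos]
      cases st with
      | none => exact ih (k + 1) (by omega) _ (by simp [Option.getD]; try omega)
      | some s => exact ih (k + 1) (by omega) _ (by simp [Option.getD]; try omega)
    · cases st with
      | none =>
        simp only [pvRunsM, hd, if_neg, Bool.false_eq_true, not_false_iff]
        exact ih (k + 1) (by omega) none (by simp)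
      | some s =>
        simp only [pvRunsM, hd, if_neg, Bool.false_eq_true, not_false_iff]
        refine List.Pairwise.cons ?_ (ih (k + 1) (by omega) none (by simp))
        intro b hb
        have := runsM_lb l (l.length) (k + 1) (by omega) none ((k : Int) + 1) (by simp) b hb
        simp only
        omega

-- extract_num's left scan walks exactly to the run start
theorem extLeft_spec (l : List Char) (s : Nat) : ∀ (j : Nat) (num : List Char) (fuel : Nat),
    s ≤ j → j ≤ l.length →
    (∀ t : Nat, s ≤ t → t < j → pvDg l t = true) →
    (PySem.List.pyGet? l ((s : Int) - 1)).elim true (fun c => PySem.Chars.isdigit c = false) →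
    j - s < fuel →
    pvExtLeft l fuel num j = (l.drop s).take (j - s) ++ num := by
  intro j
  induction j using Nat.strong_induction_on with
  | _ j ihj =>
    intro num fuel hsj hjl hdig hstop hfuel
    match fuel, hfuel with
    | fuel + 1, _ =>
      by_cases hjs : j = s
      · subst hjs
        simp only [pvExtLeft, Nat.sub_self, List.take_zero, List.nil_append]
        revert hstop
        cases hget : PySem.List.pyGet? l ((j : Int) - 1) with
        | none => intro _; rfl
        | some c =>
          intro hstop
          simp only [Option.elim] at hstop
          simp [hstop]
      · have hsj1 : s ≤ j - 1 := by omega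
        have hd1 : pvDg l ((j - 1 : Nat) : Int) = true := hdig (j - 1) hsj1 (by omega)
        have hlt : j - 1 < l.length := by
          have := (pvDg_true_lt hd1).2
          omega
        have hdd : PySem.Chars.isdigit l[j - 1] = true := by
          rw [pvDg_nat_lt hlt] at hd1; exact hd1
        have hcast : ((j : Int) - 1) = ((j - 1 : Nat) : Int) := by omega
        simp only [pvExtLeft, hcast, PySem.List.pyGet?_natCast,
          List.getElem?_eq_getElem hlt, hdd, if_pos]
        rw [ihj (j - 1) (by omega) (l[j - 1] :: num) fuel hsj1 (by omega)
          (fun t ht1 ht2 => hdig t ht1 (by omega)) hstop (by omega)]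
        have htake : (l.drop s).take (j - s) = (l.drop s).take (j - 1 - s) ++ [l[j - 1]] := by
          have h1 : j - s = (j - 1 - s) + 1 := by omega
          rw [h1, List.take_succ]
          have h2 : (l.drop s)[j - 1 - s]? = some l[j - 1] := by
            rw [List.getElem?_drop]
            have : s + (j - 1 - s) = j - 1 := by omega
            rw [this, List.getElem?_eq_getElem hlt]
          simp [h2]
        rw [htake, List.append_assoc]
        rfl

-- extract_num's right scan walks exactly to the run end
theorem extRight_spec (l : List Char) (e : Nat) (he : e + 1 < l.length)
    (hstop : PySem.Chars.isdigit l[e + 1] = false) :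
    ∀ (j : Nat) (num : List Char) (fuel : Nat),
    j ≤ e →
    (∀ t : Nat, j < t → t ≤ e → pvDg l t = true) →
    e - j < fuel →
    pvExtRight l fuel num j = num ++ (l.drop (j + 1)).take (e - j) := by
  intro j
  induction hn : e - j generalizing j with
  | zero =>
    intro num fuel hje hdig hfuel
    have hje' : j = e := by omega
    subst hje'
    match fuel, hfuel with
    | fuel + 1, _ =>
      have hcast : ((j : Int) + 1) = ((j + 1 : Nat) : Int) := by omega
      simp only [pvExtRight, hcast, PySem.List.pyGet?_natCast,
        List.getElem?_eq_getElem he, hstop]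
      simp
  | succ m ihm =>
    intro num fuel hje hdig hfuel
    match fuel, hfuel with
    | fuel + 1, _ =>
      have hj1 : j + 1 ≤ e := by omega
      have hlt : j + 1 < l.length := by omega
      have hd1 : pvDg l ((j + 1 : Nat) : Int) = true := hdig (j + 1) (by omega) hj1
      have hdd : PySem.Chars.isdigit l[j + 1] = true := by
        rw [pvDg_nat_lt hlt] at hd1; exact hd1
      have hcast : ((j : Int) + 1) = ((j + 1 : Nat) : Int) := by omega
      simp only [pvExtRight, hcast, PySem.List.pyGet?_natCast,
        List.getElem?_eq_getElem hlt, hdd, if_pos]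
      rw [ihm (j + 1) (by omega) (num ++ [l[j + 1]]) fuel hj1
        (fun t ht1 ht2 => hdig t (by omega) ht2) (by omega)]
      have hdrop : (l.drop (j + 1)).take (m + 1) = l[j + 1] :: (l.drop (j + 2)).take m := by
        rw [List.drop_eq_getElem_cons hlt, List.take_succ_cons]
      rw [hdrop]
      simp

theorem extract_spec (l : List Char) (s i e : Nat)
    (hsi : s ≤ i) (hie : i ≤ e) (hen : e + 1 < l.length)
    (hdig : ∀ t : Nat, s ≤ t → t ≤ e → pvDg l t = true)
    (hl : (PySem.List.pyGet? l ((s : Int) - 1)).elim true (fun c => PySem.Chars.isdigit c = false))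
    (hr : PySem.Chars.isdigit l[e + 1] = false) :
    pvExtract l i = (l.drop s).take (e + 1 - s) := by
  have hil : i < l.length := by omega
  have hget : PySem.List.pyGet? l (i : Int) = some l[i] := by
    simp [PySem.List.pyGet?_natCast, List.getElem?_eq_getElem hil]
  simp only [pvExtract, hget]
  rw [extLeft_spec l s i [l[i]] (2 * l.length + 2) hsi (by omega)
    (fun t ht1 ht2 => hdig t ht1 (by omega)) hl (by omega)]
  rw [extRight_spec l e hen hr i ((l.drop s).take (i - s) ++ [l[i]]) (2 * l.length + 2) hie
    (fun t ht1 ht2 => hdig t (by omega) ht2) (by omega)]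
  have h1 : e + 1 - s = (i - s) + (e + 1 - i) := by omega
  rw [h1, List.take_add]
  have h2 : (l.drop s).drop (i - s) = l.drop i := by
    rw [List.drop_drop]
    congr 1
    omega
  have h3 : l.drop i = l[i] :: l.drop (i + 1) := List.drop_eq_getElem_cons hil
  have h4 : e + 1 - i = (e - i) + 1 := by omega
  rw [h2, h3, h4, List.take_succ_cons]
  simp [List.append_assoc]

theorem RA_sound (l : List Char) : ∀ se ∈ pvRunsM l 0 none, pvIsRun l se.1 se.2 := by
  have h := runsM_sound l l.length 0 (by omega) none (Or.inl ⟨rfl, Or.inl rfl⟩)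
  simpa using h

theorem RA_complete (l : List Char) (j : Nat) (hj : pvDg l (j : Int) = true) :
    ∃ se ∈ pvRunsM l 0 none, se.1 ≤ (j : Int) ∧ (j : Int) ≤ se.2 := by
  have h := runsM_complete l l.length 0 (by omega) none (Or.inl rfl) j hj (Or.inl (by omega))
  simpa using h

theorem RA_pairwise (l : List Char) : (pvRunsM l 0 none).Pairwise (fun a b => a.2 < b.1) := by
  have h := runsM_pairwise l l.length 0 (by omega) none trivial
  simpa using h

theorem pvDigA_eq (l : List Char) {i : Int} (h : 0 ≤ i) : pvDigA l i = pvDg l i := by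
  rw [pvDigA, pvDg, PySem.List.pyGet?_of_nonneg l h]
  cases l[i.toNat]? <;> simp [h]

theorem slice_run (l : List Char) {s e : Int} (hs : 0 ≤ s) (he : 0 ≤ e) :
    PySem.List.slice l (some s) (some (e + 1)) = (l.drop s.toNat).take (e.toNat + 1 - s.toNat) := by
  rw [show s = ((s.toNat : Nat) : Int) by omega, show e + 1 = ((e.toNat + 1 : Nat) : Int) by omega]
  exact PySem.List.slice_natCast l s.toNat (e.toNat + 1)

theorem extract_of_run (l : List Char) {s e i : Int} (hr : pvIsRun l s e)
    (hsi : s ≤ i) (hie : i ≤ e)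
    (hlast : s = 0 → pvDg l ((l.length : Int) - 1) = false)
    (hend : e < (l.length : Int) - 1) :
    pvExtract l i = (l.drop s.toNat).take (e.toNat + 1 - s.toNat) := by
  obtain ⟨hs0, hse, hel, hdig, hbl, hbr⟩ := hr
  have hi0 : 0 ≤ i := le_trans hs0 hsi
  have hIcast : i = ((i.toNat : Nat) : Int) := by omega
  rw [hIcast]
  apply extract_spec l s.toNat i.toNat e.toNat (by omega) (by omega) (by omega)
  · intro t ht1 ht2
    exact hdig (t : Int) (by omega) (by omega)
  · by_cases hs : s.toNat = 0
    · have hsz : s = 0 := by omega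
      rw [hs]
      have h1 : ((0 : Nat) : Int) - 1 = (-1 : Int) := by omega
      rw [h1, PySem.List.pyGet?_neg_one l, List.getLast?_eq_getElem?]
      have hlen : l.length - 1 < l.length := by omega
      rw [List.getElem?_eq_getElem hlen]
      have hd := hlast hsz
      rw [show ((l.length : Int) - 1) = ((l.length - 1 : Nat) : Int) by omega, pvDg_nat_lt hlen] at hd
      simpa using hd
    · have hlt : s.toNat - 1 < l.length := by omega
      have h1 : ((s.toNat : Nat) : Int) - 1 = ((s.toNat - 1 : Nat) : Int) := by omega
      rw [h1, PySem.List.pyGet?_natCast, List.getElem?_eq_getElem hlt]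
      have hd : pvDg l ((s.toNat - 1 : Nat) : Int) = false := by
        rw [show ((s.toNat - 1 : Nat) : Int) = s - 1 by omega]
        exact hbl
      rw [pvDg_nat_lt hlt] at hd
      simpa using hd
  · have hlt : e.toNat + 1 < l.length := by omega
    have hd : pvDg l ((e.toNat + 1 : Nat) : Int) = false := by
      rw [show ((e.toNat + 1 : Nat) : Int) = e + 1 by omega]
      exact hbr
    rw [pvDg_nat_lt hlt] at hd
    exact hd

theorem foldFilterNil (l : List Char) (lo hi i : Int) (hlh : lo ≤ hi) (hi1 : i = hi + 1)
    (dup : Bool)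
    (hdt : dup = true → lo < i ∧ pvDg l (i - 1) = true)
    (hdf : dup = false → i = lo ∨ pvDg l (i - 1) = false) :
    (pvRunsM l 0 none).filter
      (fun se => (decide (se.1 ≤ hi) && decide (i ≤ se.2)) && (!dup || decide (i ≤ se.1))) = [] := by
  rw [List.filter_eq_nil_iff]
  intro se hse
  obtain ⟨hs0, hse', hel, hdig, hbl, hbr⟩ := RA_sound l se hse
  intro hp
  simp only [Bool.and_eq_true, Bool.or_eq_true, Bool.not_eq_true', decide_eq_true_eq] at hp
  obtain ⟨⟨h1, h2⟩, h3⟩ := hp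
  have hdighi : pvDg l hi = true := hdig hi h1 (by omega)
  rcases h3 with h3 | h3
  · rcases hdf h3 with h4 | h4
    · omega
    · rw [show i - 1 = hi by omega] at h4
      rw [h4] at hdighi
      exact Bool.false_ne_true hdighi
  · omega

-- the main window-fold / filtered-runs correspondence
theorem mainFold (l : List Char) (lo hi : Int) (h0 : 0 ≤ lo) (hlh : lo ≤ hi) (hh : hi < l.length)
    (H1 : ∀ s e : Int, pvIsRun l s e → s ≤ hi → lo ≤ e → e < (l.length : Int) - 1)
    (H2 : ∀ e : Int, pvIsRun l 0 e → lo ≤ e → pvDg l ((l.length : Int) - 1) = false) :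
    ∀ (fu : Nat) (i : Int) (dup : Bool) (acc : List (List Char)),
    (hi + 1 - i).toNat ≤ fu →
    lo ≤ i → i ≤ hi + 1 →
    (dup = true → lo < i ∧ pvDg l (i - 1) = true) →
    (dup = false → i = lo ∨ pvDg l (i - 1) = false) →
    ((PySem.List.pyRange i (hi + 1) 1).foldl (pvBodyA l) (acc, dup)).1
      = acc ++ ((pvRunsM l 0 none).filter
          (fun se => (decide (se.1 ≤ hi) && decide (i ≤ se.2)) && (!dup || decide (i ≤ se.1)))).map
          (fun se => PySem.List.slice l (some se.1) (some (se.2 + 1))) := by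
  intro fu
  induction fu with
  | zero =>
    intro i dup acc hfu hlo hhi hdt hdf
    have hieq : i = hi + 1 := by omega
    rw [foldFilterNil l lo hi i hlh hieq dup hdt hdf, List.map_nil, List.append_nil]
    rw [show PySem.List.pyRange i (hi + 1) 1 = [] by simp [PySem.List.pyRange, hieq]]
    rfl
  | succ fu ih =>
    intro i dup acc hfu hlo hhi hdt hdf
    by_cases hendr : hi + 1 ≤ i
    · have hieq : i = hi + 1 := by omega
      rw [foldFilterNil l lo hi i hlh hieq dup hdt hdf, List.map_nil, List.append_nil]
      rw [show PySem.List.pyRange i (hi + 1) 1 = [] by simp [PySem.List.pyRange, hieq]]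
      rfl
    · have hilt : i < hi + 1 := by omega
      rw [PySem.List.pyRange_one_cons hilt, List.foldl_cons]
      have h0i : (0 : Int) ≤ i := by omega
      have hdA : pvDigA l i = pvDg l i := pvDigA_eq l h0i
      have hRA := RA_sound l
      by_cases hd : pvDg l i = true
      · cases dup with
        | false =>
          have hbody : pvBodyA l (acc, false) i = (acc ++ [pvExtract l i], true) := by
            simp [pvBodyA, hdA, hd]
          rw [hbody]
          rw [ih (i + 1) true (acc ++ [pvExtract l i]) (by omega) (by omega) (by omega)
            (fun _ => ⟨by omega, by rwa [show i + 1 - 1 = i by ring]⟩)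
            (by intro h; exact absurd h (by simp))]
          -- locate the run containing i
          have hd' : pvDg l ((i.toNat : Nat) : Int) = true := by
            rwa [show ((i.toNat : Nat) : Int) = i by omega]
          obtain ⟨se, hmem, hms, hme⟩ := RA_complete l i.toNat hd'
          rw [show ((i.toNat : Nat) : Int) = i by omega] at hms hme
          obtain ⟨R1, R2, hsplit⟩ := List.append_of_mem hmem
          have hpw := RA_pairwise l
          rw [hsplit] at hpw
          rw [List.pairwise_append] at hpw
          obtain ⟨hpw1, hpw2, hpw3⟩ := hpw
          have hR1 : ∀ x ∈ R1, x.2 < se.1 := fun x hx => hpw3 x hx se (List.mem_cons_self ..)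
          have hR2 : ∀ x ∈ R2, se.2 < x.1 := (List.pairwise_cons.mp hpw2).1
          have hrun := hRA se hmem
          have hrunE : se.2 < (l.length : Int) - 1 :=
            H1 se.1 se.2 hrun (by omega) (by omega)
          have hrunL : se.1 = 0 → pvDg l ((l.length : Int) - 1) = false := by
            intro h
            refine H2 se.2 ?_ (by omega)
            rw [← h]; exact hrun
          have hext : pvExtract l i = PySem.List.slice l (some se.1) (some (se.2 + 1)) := by
            rw [slice_run l hrun.1 (by have := hrun.2.1; omega)]
            exact extract_of_run l hrun hms hme hrunL hrunE
          rw [hsplit, List.filter_append, List.filter_append, List.filter_cons, List.filter_cons]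
          have hf1 : R1.filter
              (fun se => (decide (se.1 ≤ hi) && decide (i ≤ se.2)) && (!false || decide (i ≤ se.1))) = [] := by
            rw [List.filter_eq_nil_iff]
            intro x hx hp
            simp only [Bool.and_eq_true, decide_eq_true_eq] at hp
            have := hR1 x hx
            omega
          have hf2 : R1.filter
              (fun se => (decide (se.1 ≤ hi) && decide (i + 1 ≤ se.2)) && (!true || decide (i + 1 ≤ se.1))) = [] := by
            rw [List.filter_eq_nil_iff]
            intro x hx hp
            simp only [Bool.and_eq_true, Bool.or_eq_true, Bool.not_eq_true', decide_eq_true_eq] at hp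
            have := hR1 x hx
            omega
          have hps : ((decide (se.1 ≤ hi) && decide (i ≤ se.2)) && (!false || decide (i ≤ se.1))) = true := by
            simp only [Bool.not_false, Bool.true_or, Bool.and_true, Bool.and_eq_true, decide_eq_true_eq]
            omega
          have hps' : ((decide (se.1 ≤ hi) && decide (i + 1 ≤ se.2)) && (!true || decide (i + 1 ≤ se.1))) = false := by
            simp only [Bool.not_true, Bool.false_or, Bool.and_eq_false_iff, decide_eq_false_iff_not]
            right; omega
          have hfc : R2.filter
              (fun se => (decide (se.1 ≤ hi) && decide (i ≤ se.2)) && (!false || decide (i ≤ se.1)))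
            = R2.filter
              (fun se => (decide (se.1 ≤ hi) && decide (i + 1 ≤ se.2)) && (!true || decide (i + 1 ≤ se.1))) := by
            apply List.filter_congr
            intro x hx
            have hx2 := hR2 x hx
            have hxrun := hRA x (by rw [hsplit]; exact List.mem_append_right _ (List.mem_cons_of_mem _ hx))
            have hxse : x.1 ≤ x.2 := hxrun.2.1
            rw [Bool.eq_iff_iff]
            simp only [Bool.and_eq_true, Bool.or_eq_true, Bool.not_true, Bool.not_false,
              Bool.true_or, Bool.false_or, Bool.and_true, decide_eq_true_eq]
            omega
          rw [hps, hps', hf1, hf2, hfc, hext]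
          simp
        | true =>
          have hbody : pvBodyA l (acc, true) i = (acc, true) := by
            simp [pvBodyA, hdA, hd]
          rw [hbody]
          rw [ih (i + 1) true acc (by omega) (by omega) (by omega)
            (fun _ => ⟨by omega, by rwa [show i + 1 - 1 = i by ring]⟩)
            (by intro h; exact absurd h (by simp))]
          congr 1
          apply congrArg
          apply List.filter_congr
          intro x hx
          have hxrun := hRA x hx
          have hxse : x.1 ≤ x.2 := hxrun.2.1
          have hprev : pvDg l (i - 1) = true := (hdt rfl).2
          have hx1ne : x.1 ≠ i := by
            intro h
            have := hxrun.2.2.2.2.1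
            rw [h] at this
            rw [this] at hprev
            exact Bool.false_ne_true hprev
          rw [Bool.eq_iff_iff]
          simp only [Bool.and_eq_true, Bool.or_eq_true, Bool.not_true, Bool.false_or,
            decide_eq_true_eq]
          omega
      · have hbody : pvBodyA l (acc, dup) i = (acc, false) := by
          simp only [pvBodyA, hdA, hd]
          simp [Bool.and_eq_false_iff]
        rw [hbody]
        rw [ih (i + 1) false acc (by omega) (by omega) (by omega)
          (by intro h; exact absurd h (by simp))
          (fun _ => Or.inr (by rwa [show i + 1 - 1 = i by ring, ← Bool.not_eq_true]))]
        congr 1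
        apply congrArg
        apply List.filter_congr
        intro x hx
        have hxrun := hRA x hx
        have hxse : x.1 ≤ x.2 := hxrun.2.1
        have hni : ¬ (x.1 ≤ i ∧ i ≤ x.2) := by
          intro hcont
          have := hxrun.2.2.2.1 i hcont.1 hcont.2
          rw [this] at hd
          exact hd rfl
        rw [Bool.eq_iff_iff]
        cases dup <;>
          · simp only [Bool.and_eq_true, Bool.or_eq_true, Bool.not_true, Bool.not_false,
              Bool.true_or, Bool.false_or, Bool.and_true, decide_eq_true_eq]
            omega

theorem coreWindow (line : String) (index : Int)
    (h0i : 0 ≤ index) (hin : index < line.toList.length) (h2n : 2 ≤ line.toList.length)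
    (hsuf : ¬ ((line.toList.drop (min (line.toList.length - 1) (index + 1).toNat)).all
      PySem.Chars.isdigit = true))
    (hnd : ¬ D_check_rows_star line index) :
    ∀ lo hi : Int, lo = max 0 (index - 1) → hi = min ((line.toList.length : Int) - 1) (index + 1) →
    ((PySem.List.pyRange lo (hi + 1) 1).foldl (pvBodyA line.toList) ([], false)).1
      = ((pvRunsM line.toList 0 none).filter
          (fun q => decide (q.1 ≤ hi) && decide (lo ≤ q.2))).map
          (fun q => PySem.List.slice line.toList (some q.1) (some (q.2 + 1))) := by
  set l : List Char := line.toList with hldef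
  intro lo hi hlo hhi
  have hH1 : ∀ s e : Int, pvIsRun l s e → s ≤ hi → lo ≤ e → e < (l.length : Int) - 1 := by
    intro s e hr hshi hloe
    by_contra hcon
    obtain ⟨hs0, hse, hel, hdig, hbl, hbr⟩ := hr
    have hee : e = (l.length : Int) - 1 := by omega
    apply hsuf
    rw [List.all_eq_true]
    intro c hc
    obtain ⟨t, ht, hct⟩ := List.mem_iff_getElem.mp hc
    rw [List.getElem_drop] at hct
    have hml : (min (l.length - 1) (index + 1).toNat) + t < l.length := by
      simp only [List.length_drop] at ht
      omega
    have hd : pvDg l (((min (l.length - 1) (index + 1).toNat) + t : Nat) : Int) = true := by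
      apply hdig <;> omega
    rw [pvDg_nat_lt hml] at hd
    rw [← hct]
    exact hd
  have hH2 : ∀ e : Int, pvIsRun l 0 e → lo ≤ e → pvDg l ((l.length : Int) - 1) = false := by
    intro e hr hloe
    cases hdg : pvDg l ((l.length : Int) - 1) with
    | false => rfl
    | true =>
      exfalso
      obtain ⟨hs0, hse, hel, hdig, hbl, hbr⟩ := hr
      unfold D_check_rows_star at hnd
      refine hnd (Or.inl ⟨h0i, ?_, hdg⟩)
      rw [List.all_eq_true]
      intro c hc
      obtain ⟨t, ht, hct⟩ := List.mem_iff_getElem.mp hc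
      rw [List.getElem_take] at hct
      have htl : t < l.length := by
        simp only [List.length_take] at ht
        omega
      have htle : ((t : Nat) : Int) ≤ e := by
        simp only [List.length_take] at ht
        omega
      have hd : pvDg l ((t : Nat) : Int) = true := hdig _ (by omega) htle
      rw [pvDg_nat_lt htl] at hd
      rw [← hct]
      exact hd
  have hmain := mainFold l lo hi (by omega) (by omega) (by omega) hH1 hH2
    ((hi + 1 - lo).toNat) lo false [] (le_refl _) (le_refl _) (by omega)
    (by intro h; exact absurd h (by simp)) (fun _ => Or.inl rfl)
  rw [hmain, List.nil_append]
  congr 1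
  apply List.filter_congr
  intro x hx
  simp

theorem pvDigA_shift (l : List Char) (j : Int) (h1 : -(l.length : Int) ≤ j) (h2 : j < 0) :
    pvDigA l j = pvDg l ((l.length : Int) + j) := by
  have hk : j = -(((-j).toNat : Nat) : Int) := by omega
  rw [pvDigA, hk, PySem.List.pyGet?_neg_natCast l (-j).toNat (by omega) (by omega)]
  have h3 : (0 : Int) ≤ (l.length : Int) + -(((-j).toNat : Nat) : Int) := by omega
  have h4 : ((l.length : Int) + -(((-j).toNat : Nat) : Int)).toNat = l.length - (-j).toNat := by
    omega
  have hdec : (decide ((0 : Int) ≤ (l.length : Int) + -(((-j).toNat : Nat) : Int))) = true := by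
    simp only [decide_eq_true_eq]
    omega
  rw [pvDg, h4, hdec]
  cases l[l.length - (-j).toNat]? <;> simp

theorem body_skip0 (l : List Char) (j : Int) (h : pvDigA l j = false) :
    pvBodyA l (([] : List (List Char)), false) j = (([] : List (List Char)), false) := by
  simp [pvBodyA, h]

theorem coreZero (l : List Char) (h2n : 2 ≤ l.length)
    (hc1 : pvDg l ((l.length : Int) - 1) = false) :
    ((PySem.List.pyRange 0 1 1).foldl (pvBodyA l) ([], false)).1
      = ((pvRunsM l 0 none).filter
          (fun q => decide (q.1 ≤ (0 : Int)) && decide ((0 : Int) ≤ q.2))).map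
          (fun q => PySem.List.slice l (some q.1) (some (q.2 + 1))) := by
  have hH1 : ∀ s e : Int, pvIsRun l s e → s ≤ 0 → 0 ≤ e → e < (l.length : Int) - 1 := by
    intro s e hr hs he
    obtain ⟨hs0, hse, hel, hdig, hbl, hbr⟩ := hr
    by_contra hcon
    have hd := hdig ((l.length : Int) - 1) (by omega) (by omega)
    rw [hc1] at hd
    exact Bool.false_ne_true hd
  have hH2 : ∀ e : Int, pvIsRun l 0 e → (0 : Int) ≤ e → pvDg l ((l.length : Int) - 1) = false :=
    fun _ _ _ => hc1
  have hmain := mainFold l 0 0 (le_refl _) (le_refl _) (by omega) hH1 hH2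
    1 0 false [] (by omega) (le_refl _) (by omega)
    (by intro h; exact absurd h (by simp)) (fun _ => Or.inl rfl)
  rw [show (0 : Int) + 1 = 1 by norm_num] at hmain
  rw [hmain, List.nil_append]
  congr 1
  apply List.filter_congr
  intro x hx
  simp

-- ===== VERDICT (by name: the statement is the Claim_ definition above) =====
theorem check_rows_star_spec : Claim_unchanged_check_rows_star := by
  intro line index hdom hpre
  unfold Spec_check_rows_star
  intro hnd
  -- evaluate B via the run-collection lemma
  rcases hq : pvRunsLoop (PySem.List.enumerate line.toList 0) [] none with ⟨r, st⟩
  have hRuns := runsLoop_eq line.toList 0 [] none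
  rw [hq] at hRuns
  simp only [zero_add, List.nil_append] at hRuns
  have hB : check_rows_star_alt line index
      = ((pvRunsM line.toList 0 none).filter
          (fun q => decide (q.1 ≤ min ((line.toList.length : Int) - 1) (index + 1)) &&
            decide (max 0 (index - 1) ≤ q.2))).map
          (fun q => String.ofList (PySem.List.slice line.toList (some q.1) (some (q.2 + 1)))) := by
    simp only [check_rows_star_alt, hq]
    rw [← hRuns]
  rw [hB]
  simp only [check_rows_star]
  rcases hpre with ⟨h0i, hin, h2n, hsuf⟩ | ⟨hix, h2n, hc2, hc1⟩ | ⟨hge, hle, hc1, hc2, hc3⟩ |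
    hr1 | hr2
  · -- valid star column: the window fold against the filtered runs
    have hcore := coreWindow line index h0i hin h2n hsuf hnd
    by_cases h1 : index = 0
    · subst h1
      rw [if_pos rfl]
      rw [show max (0 : Int) (0 - 1) = 0 by omega,
        show min ((line.toList.length : Int) - 1) (0 + 1) = 1 by omega]
      rw [show (0 : Int) + 2 = 1 + 1 by norm_num]
      rw [hcore 0 1 (by omega) (by omega), List.map_map]
      simp [Function.comp_def]
    · rw [if_neg h1]
      by_cases h2 : index = (line.toList.length : Int) - 1
      · rw [if_pos h2]
        rw [show max (0 : Int) (index - 1) = index - 1 by omega,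
          show min ((line.toList.length : Int) - 1) (index + 1) = index by omega]
        rw [hcore (index - 1) index (by omega) (by omega), List.map_map]
        simp [Function.comp_def]
      · rw [if_neg h2]
        rw [show max (0 : Int) (index - 1) = index - 1 by omega,
          show min ((line.toList.length : Int) - 1) (index + 1) = index + 1 by omega]
        rw [show index + 2 = (index + 1) + 1 by ring]
        rw [hcore (index - 1) (index + 1) (by omega) (by omega), List.map_map]
        simp [Function.comp_def]
  · -- index = -1, both wrapped cells digit-free: A's wrapped window reduces to cell 0
    subst hix
    rw [if_neg (by norm_num), if_neg (by omega)]
    rw [show max (0 : Int) (-1 - 1) = 0 by omega,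
      show min ((line.toList.length : Int) - 1) (-1 + 1) = 0 by omega]
    rw [show (-1 : Int) - 1 = -2 by norm_num, show (-1 : Int) + 2 = 1 by norm_num]
    rw [PySem.List.pyRange_one_cons (show (-2 : Int) < 1 by norm_num), List.foldl_cons,
      body_skip0 line.toList (-2)
        (by rw [pvDigA_shift line.toList (-2) (by omega) (by omega),
              show (line.toList.length : Int) + -2 = (line.toList.length : Int) - 2 by ring]
            exact hc2)]
    rw [show (-2 : Int) + 1 = -1 by norm_num]
    rw [PySem.List.pyRange_one_cons (show (-1 : Int) < 1 by norm_num), List.foldl_cons,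
      body_skip0 line.toList (-1)
        (by rw [pvDigA_shift line.toList (-1) (by omega) (by omega),
              show (line.toList.length : Int) + -1 = (line.toList.length : Int) - 1 by ring]
            exact hc1)]
    rw [show (-1 : Int) + 1 = 0 by norm_num]
    rw [coreZero line.toList h2n hc1, List.map_map]
    simp [Function.comp_def]
  · -- index ≤ -2 with a digit-free wrapped window: both sides are empty
    have hn3 : 3 ≤ line.toList.length := by omega
    rw [if_neg (by omega), if_neg (by omega)]
    rw [PySem.List.pyRange_one_cons (show index - 1 < index + 2 by omega), List.foldl_cons,
      body_skip0 line.toList (index - 1)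
        (by rw [pvDigA_shift line.toList (index - 1) (by omega) (by omega),
              show (line.toList.length : Int) + (index - 1)
                = (line.toList.length : Int) + index - 1 by ring]
            exact hc1)]
    rw [show index - 1 + 1 = index by ring]
    rw [PySem.List.pyRange_one_cons (show index < index + 2 by omega), List.foldl_cons,
      body_skip0 line.toList index
        (by rw [pvDigA_shift line.toList index (by omega) (by omega)]
            exact hc2)]
    rw [PySem.List.pyRange_one_cons (show index + 1 < index + 2 by omega), List.foldl_cons,
      body_skip0 line.toList (index + 1)
        (by rw [pvDigA_shift line.toList (index + 1) (by omega) (by omega),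
              show (line.toList.length : Int) + (index + 1)
                = (line.toList.length : Int) + index + 1 by ring]
            exact hc3)]
    rw [show index + 1 + 1 = index + 2 by ring]
    rw [show PySem.List.pyRange (index + 2) (index + 2) 1 = [] by simp [PySem.List.pyRange]]
    have hfil : (pvRunsM line.toList 0 none).filter
        (fun q => decide (q.1 ≤ min ((line.toList.length : Int) - 1) (index + 1)) &&
          decide (max 0 (index - 1) ≤ q.2)) = [] := by
      rw [List.filter_eq_nil_iff]
      intro x hx hp
      have hs0 := (RA_sound line.toList x hx).1
      simp only [Bool.and_eq_true, decide_eq_true_eq] at hp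
      have := hp.1
      omega
    rw [hfil]
    simp
  · -- index = -1 with a digit in A's wrapped window: inside D_, nothing to prove
    exfalso
    apply hnd
    obtain ⟨hix, h2n, hc0, hc⟩ := hr1
    subst hix
    refine Or.inr ⟨by norm_num, ?_⟩
    rcases hc with h | h
    · exact Or.inl (by
        rwa [show (line.toList.length : Int) + -1 - 1 = (line.toList.length : Int) - 2 by ring])
    · exact Or.inr (Or.inl (by
        rwa [show (line.toList.length : Int) + -1 = (line.toList.length : Int) - 1 by ring]))
  · -- index ≤ -2 with a digit in A's wrapped window: inside D_, nothing to prove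
    exfalso
    apply hnd
    obtain ⟨hge, hle, hc0, hcl, hc⟩ := hr2
    exact Or.inr ⟨by omega, hc⟩

theorem check_rows_star_changed : Claim_changed_check_rows_star := by
  unfold Claim_changed_check_rows_star; decide
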